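-- pv_equiv track=rewrite | github.com/gabrielrdc23/tecnologia-informa-o-integrada | Quiz2/Quiz29-02.py | mes_maior_vendas
-- ===== SOURCE A (Python) =====
-- def mes_maior_vendas(dados_csv):
--     mes_vendas = {}
--     for linha in dados_csv[1:]:
--         mes = linha[0]
--         vendas = int(linha[1])
--         if mes in mes_vendas:
--             mes_vendas[mes] += vendas
--         else:
--             mes_vendas[mes] = vendas
--     return max(mes_vendas, key=mes_vendas.get)
-- ===== SOURCE B (Python) =====
-- def mes_maior_vendas(dados_csv):
--     rows = dados_csv[1:]
--     meses = []
--     for linha in rows: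
--         if linha[0] not in meses:
--             meses.append(linha[0])
--
--     def total(m):
--         return sum(int(linha[1]) for linha in rows if linha[0] == m)
--
--     return max(meses, key=total)
-- ===== Notes on version B (the rewrite author's own statement) =====
-- stated objective: alternative
-- what changed: Instead of aggregating totals into a dict in one pass and taking max over the dict, B first collects the distinct months in first-appearance order and then computes each month's total by a separate filtered-sum scan, taking max over that list.
import Mathlib
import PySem

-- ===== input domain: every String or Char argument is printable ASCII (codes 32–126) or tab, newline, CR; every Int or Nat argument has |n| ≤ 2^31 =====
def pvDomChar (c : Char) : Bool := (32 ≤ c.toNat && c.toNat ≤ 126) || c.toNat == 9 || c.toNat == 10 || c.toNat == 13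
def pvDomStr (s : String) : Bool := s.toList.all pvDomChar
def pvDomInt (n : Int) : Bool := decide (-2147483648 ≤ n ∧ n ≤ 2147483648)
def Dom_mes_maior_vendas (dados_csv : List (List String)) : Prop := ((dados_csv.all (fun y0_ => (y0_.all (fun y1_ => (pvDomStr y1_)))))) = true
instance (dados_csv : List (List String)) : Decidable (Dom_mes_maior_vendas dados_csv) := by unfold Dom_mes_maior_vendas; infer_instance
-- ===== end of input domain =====

-- B collects distinct months in first-appearance order, then totals each month by a filtered-sum scan; alternative decomposition, same results.


-- ===== PORT A =====
-- the fold carries Option: none marks the row where Python raises (IndexError/ValueError); such inputs are outside Pre_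
def mes_maior_vendas (dados_csv : List (List String)) : String :=
  let mes_vendas : Option (PySem.Dict String Int) :=
    (PySem.List.slice dados_csv (some 1) none).foldl
      (fun st linha => st.bind fun mv =>
        (PySem.List.pyGet? linha 0).bind fun mes =>
        (PySem.List.pyGet? linha 1).bind fun s =>
        (PySem.Int.ofStr? s).map fun vendas =>
          if mv.contains mes then mv.insert mes (mv.getD mes 0 + vendas)
          else mv.insert mes vendas)
      (some PySem.Dict.empty)
  match mes_vendas with
  | none => ""          -- exception, outside Pre_
  | some mv =>
    match PySem.List.max? mv.keys (fun m => mv.getD m 0) with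
    | some m => m
    | none => ""        -- ValueError on empty dict, outside Pre_

-- ===== PORT B =====
def mes_maior_vendas_alt (dados_csv : List (List String)) : String :=
  let rows := PySem.List.slice dados_csv (some 1) none
  let meses : Option (List String) :=
    rows.foldl (fun st linha => st.bind fun ms =>
      (PySem.List.pyGet? linha 0).map fun m => if m ∈ ms then ms else ms ++ [m]) (some [])
  let total : String → Option Int := fun m =>
    rows.foldl (fun st linha => st.bind fun acc =>
      (PySem.List.pyGet? linha 0).bind fun m0 =>
      if m0 == m then
        (PySem.List.pyGet? linha 1).bind fun s =>
        (PySem.Int.ofStr? s).map fun v => acc + v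
      else some acc) (some 0)
  match meses with
  | none => ""          -- exception, outside Pre_
  | some ms =>
    match PySem.List.max? ms (fun m => (total m).getD 0) with
    | some m => m
    | none => ""        -- ValueError on empty list, outside Pre_

-- ===== PRECONDITION & SPEC =====
-- a data row is usable: it has at least 2 fields and its second field parses as int
def pvOkRow (l : List String) : Bool := 2 ≤ l.length && (PySem.Int.ofStr? (l.getD 1 "")).isSome
-- Pre_ excludes exactly the inputs where Python A raises: a data row shorter than 2 (IndexError), a
-- second field int() rejects (ValueError), or no data rows at all (max() ValueError on empty dict)
def Pre_mes_maior_vendas (dados_csv : List (List String)) : Prop :=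
  dados_csv.tail ≠ [] ∧ ∀ l ∈ dados_csv.tail, pvOkRow l = true
instance (dados_csv : List (List String)) : Decidable (Pre_mes_maior_vendas dados_csv) := by unfold Pre_mes_maior_vendas; infer_instance
def pvWitness_mes_maior_vendas : List (List String) := [["mes", "vendas"], ["jan", "3"], ["fev", "5"]]
def Spec_mes_maior_vendas (dados_csv : List (List String)) (out : String) : Prop := out = mes_maior_vendas_alt dados_csv
instance (dados_csv : List (List String)) (out : String) : Decidable (Spec_mes_maior_vendas dados_csv out) := by unfold Spec_mes_maior_vendas; infer_instance

-- ===== CLAIM (what is proved, stated in full; the proofs are below) =====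
def Claim_equal_mes_maior_vendas : Prop := ∀ (dados_csv : List (List String)), Dom_mes_maior_vendas dados_csv → Pre_mes_maior_vendas dados_csv → Spec_mes_maior_vendas dados_csv (mes_maior_vendas dados_csv)

-- ===== LEMMAS AND PROOFS =====
def pvKey0 (l : List String) : String := l.getD 0 ""
def pvVal1 (l : List String) : Int := (PySem.Int.ofStr? (l.getD 1 "")).getD 0
def pvStepA (d : PySem.Dict String Int) (l : List String) : PySem.Dict String Int :=
  if d.contains (pvKey0 l) then d.insert (pvKey0 l) (d.getD (pvKey0 l) 0 + pvVal1 l)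
  else d.insert (pvKey0 l) (pvVal1 l)

theorem pvGet0_of_ok (l : List String) (h : pvOkRow l = true) :
    PySem.List.pyGet? l 0 = some (l.getD 0 "") := by
  simp only [pvOkRow, Bool.and_eq_true, decide_eq_true_eq] at h
  match l, h with
  | a :: b :: t, _ =>
    simp [PySem.List.pyGet?, PySem.List.pyIdx?]
    rw [if_pos (by omega)]
    simp

theorem pvGet1_of_ok (l : List String) (h : pvOkRow l = true) :
    PySem.List.pyGet? l 1 = some (l.getD 1 "") := by
  simp only [pvOkRow, Bool.and_eq_true, decide_eq_true_eq] at h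
  match l, h with
  | a :: b :: t, _ =>
    simp [PySem.List.pyGet?, PySem.List.pyIdx?]

theorem pvOfStr_of_ok (l : List String) (h : pvOkRow l = true) :
    PySem.Int.ofStr? (l.getD 1 "") = some (pvVal1 l) := by
  simp only [pvOkRow, Bool.and_eq_true] at h
  obtain ⟨-, h2⟩ := h
  cases hv : PySem.Int.ofStr? (l.getD 1 "") with
  | none => rw [hv] at h2; simp at h2
  | some v => simp only [pvVal1, hv, Option.getD_some]

theorem pv_threadA (rows : List (List String)) (h : ∀ l ∈ rows, pvOkRow l = true)
    (d : PySem.Dict String Int) :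
    rows.foldl
      (fun st linha => st.bind fun mv =>
        (PySem.List.pyGet? linha 0).bind fun mes =>
        (PySem.List.pyGet? linha 1).bind fun s =>
        (PySem.Int.ofStr? s).map fun vendas =>
          if mv.contains mes then mv.insert mes (mv.getD mes 0 + vendas)
          else mv.insert mes vendas)
      (some d) = some (rows.foldl pvStepA d) := by
  induction rows generalizing d with
  | nil => rfl
  | cons l t ih =>
    have hl : pvOkRow l = true := h l (List.mem_cons_self ..)
    simp only [List.foldl_cons, Option.bind_some, pvGet0_of_ok l hl, pvGet1_of_ok l hl,
      pvOfStr_of_ok l hl, Option.map_some]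
    rw [ih (fun x hx => h x (List.mem_cons_of_mem _ hx))]
    rfl

theorem pv_threadB_meses (rows : List (List String)) (h : ∀ l ∈ rows, pvOkRow l = true)
    (ms : List String) :
    rows.foldl
      (fun st linha => st.bind fun ms =>
        (PySem.List.pyGet? linha 0).map fun m => if m ∈ ms then ms else ms ++ [m])
      (some ms)
    = some (rows.foldl (fun ms l => if pvKey0 l ∈ ms then ms else ms ++ [pvKey0 l]) ms) := by
  induction rows generalizing ms with
  | nil => rfl
  | cons l t ih =>
    have hl : pvOkRow l = true := h l (List.mem_cons_self ..)
    simp only [List.foldl_cons, Option.bind_some, pvGet0_of_ok l hl, Option.map_some]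
    exact ih (fun x hx => h x (List.mem_cons_of_mem _ hx)) _

theorem pv_threadB_total (rows : List (List String)) (h : ∀ l ∈ rows, pvOkRow l = true)
    (m : String) (acc : Int) :
    rows.foldl
      (fun st linha => st.bind fun acc =>
        (PySem.List.pyGet? linha 0).bind fun m0 =>
        if m0 == m then
          (PySem.List.pyGet? linha 1).bind fun s =>
          (PySem.Int.ofStr? s).map fun v => acc + v
        else some acc)
      (some acc)
    = some (acc + ((rows.filter (fun l => pvKey0 l == m)).map pvVal1).sum) := by
  induction rows generalizing acc with
  | nil => simp
  | cons l t ih =>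
    have hl : pvOkRow l = true := h l (List.mem_cons_self ..)
    have ht := fun x hx => h x (List.mem_cons_of_mem l hx)
    simp only [List.foldl_cons, Option.bind_some, pvGet0_of_ok l hl, List.filter_cons]
    cases hm : (pvKey0 l == m) with
    | false =>
      rw [show ((l.getD 0 "" == m) = false) from hm]
      simp only [Bool.false_eq_true, if_false, ih ht]
    | true =>
      rw [show ((l.getD 0 "" == m) = true) from hm]
      simp only [if_true, pvGet1_of_ok l hl, pvOfStr_of_ok l hl, Option.bind_some,
        Option.map_some, ih ht, List.map_cons, List.sum_cons]
      exact congrArg some (by ring)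

theorem pv_getD_foldA (rows : List (List String)) (d : PySem.Dict String Int) (m : String) :
    (rows.foldl pvStepA d).getD m 0
    = d.getD m 0 + ((rows.filter (fun l => pvKey0 l == m)).map pvVal1).sum := by
  induction rows generalizing d with
  | nil => simp
  | cons l t ih =>
    simp only [List.foldl_cons, List.filter_cons, ih]
    have hstep : (pvStepA d l).getD m 0
        = d.getD m 0 + (if (pvKey0 l == m) = true then pvVal1 l else 0) := by
      unfold pvStepA
      by_cases hk : m = pvKey0 l
      · have hb : (pvKey0 l == m) = true := by simp [hk]
        rw [hb]
        split
        · rw [PySem.Dict.getD_insert]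
          simp [hk]
        · rename_i hc
          rw [PySem.Dict.getD_insert]
          simp only [hk, if_true]
          rw [PySem.Dict.getD_of_not_contains _ _ (by simpa using hc)]
          ring
      · have hb : (pvKey0 l == m) = false := by simp [Ne.symm hk]
        rw [hb]
        split <;> rw [PySem.Dict.getD_insert, if_neg hk] <;> simp
    rw [hstep]
    cases hm : (pvKey0 l == m) with
    | false => simp
    | true => simp only [if_true, List.map_cons, List.sum_cons]; ring

theorem pv_keys_foldA (rows : List (List String)) (d : PySem.Dict String Int) :
    (rows.foldl pvStepA d).keys = PySem.Set.update d.keys (rows.map pvKey0) := by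
  induction rows generalizing d with
  | nil => rfl
  | cons l t ih =>
    simp only [List.foldl_cons, List.map_cons, PySem.Set.update, ih]
    have hadd : (pvStepA d l).keys = PySem.Set.add d.keys (pvKey0 l) := by
      unfold pvStepA
      by_cases hc : d.contains (pvKey0 l) = true
      · rw [if_pos hc, PySem.Dict.keys_insert_of_contains _ _ hc, PySem.Set.add,
          if_pos (by simp [PySem.Set.contains, ← PySem.Dict.contains_iff_mem_keys, hc])]
      · have hc' : d.contains (pvKey0 l) = false := by simpa using hc
        rw [if_neg hc, PySem.Dict.keys_insert_of_not_contains _ _ hc', PySem.Set.add,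
          if_neg (by simp [PySem.Set.contains, ← PySem.Dict.contains_iff_mem_keys, hc'])]
    rw [hadd]

theorem pv_meses_eq_update (rows : List (List String)) (ms : List String) :
    rows.foldl (fun ms l => if pvKey0 l ∈ ms then ms else ms ++ [pvKey0 l]) ms
    = PySem.Set.update ms (rows.map pvKey0) := by
  induction rows generalizing ms with
  | nil => rfl
  | cons l t ih =>
    simp only [List.foldl_cons, List.map_cons, PySem.Set.update, ih]
    have hadd : (if pvKey0 l ∈ ms then ms else ms ++ [pvKey0 l]) = PySem.Set.add ms (pvKey0 l) := by
      simp [PySem.Set.add]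
    rw [hadd]

theorem pv_max?_congr_aux {α κ : Type} [LT κ] [DecidableLT κ] (xs : List α) (f g : α → κ)
    (h : ∀ x ∈ xs, f x = g x) (acc : Option α) (hacc : ∀ m, acc = some m → f m = g m) :
    xs.foldl
      (fun acc x => match acc with
        | none => some x
        | some m => if f m < f x then some x else some m) acc
    = xs.foldl
      (fun acc x => match acc with
        | none => some x
        | some m => if g m < g x then some x else some m) acc := by
  induction xs generalizing acc with
  | nil => rfl
  | cons x t ih =>
    have hx : f x = g x := h x (List.mem_cons_self ..)
    have ht := fun y hy => h y (List.mem_cons_of_mem x hy)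
    simp only [List.foldl_cons]
    cases acc with
    | none => exact ih ht (some x) (by intro m hm; cases hm; exact hx)
    | some m =>
      have hm : f m = g m := hacc m rfl
      show t.foldl
          (fun acc x => match acc with
            | none => some x
            | some m => if f m < f x then some x else some m)
          (if f m < f x then some x else some m)
        = t.foldl
          (fun acc x => match acc with
            | none => some x
            | some m => if g m < g x then some x else some m)
          (if g m < g x then some x else some m)
      rw [hm, hx]
      apply ih ht
      intro m' hm'
      split at hm' <;> cases hm'
      · exact hx
      · exact hm

theorem pv_max?_congr {α κ : Type} [LT κ] [DecidableLT κ] (xs : List α) (f g : α → κ)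
    (h : ∀ x ∈ xs, f x = g x) : PySem.List.max? xs f = PySem.List.max? xs g := by
  unfold PySem.List.max?
  exact pv_max?_congr_aux xs f g h none (by intro m hm; cases hm)

-- ===== VERDICT (by name: the statement is the Claim_ definition above) =====
theorem mes_maior_vendas_spec : Claim_equal_mes_maior_vendas := by
  intro dados_csv _ hpre
  obtain ⟨-, hok⟩ := hpre
  simp only [Spec_mes_maior_vendas, mes_maior_vendas, mes_maior_vendas_alt,
    PySem.List.slice_from_one, pv_threadA dados_csv.tail hok, pv_threadB_meses dados_csv.tail hok]
  have hkeys : (dados_csv.tail.foldl pvStepA PySem.Dict.empty).keys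
      = dados_csv.tail.foldl (fun ms l => if pvKey0 l ∈ ms then ms else ms ++ [pvKey0 l]) [] := by
    rw [pv_keys_foldA, pv_meses_eq_update]
    simp
  rw [hkeys]
  have hfg : ∀ m ∈ dados_csv.tail.foldl
      (fun ms l => if pvKey0 l ∈ ms then ms else ms ++ [pvKey0 l]) [],
      (dados_csv.tail.foldl pvStepA PySem.Dict.empty).getD m 0
      = (dados_csv.tail.foldl
          (fun st linha => st.bind fun acc =>
            (PySem.List.pyGet? linha 0).bind fun m0 =>
            if m0 == m then
              (PySem.List.pyGet? linha 1).bind fun s =>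
              (PySem.Int.ofStr? s).map fun v => acc + v
            else some acc)
          (some 0)).getD 0 := by
    intro m _
    rw [pv_getD_foldA, pv_threadB_total dados_csv.tail hok m 0]
    simp
  rw [pv_max?_congr _ _ _ hfg]
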